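-- pv_equiv track=rewrite | github.com/mimseong/BaekJoon | 27649.py | solve
-- ===== SOURCE A (Python) =====
-- def solve(string, token):
--     result = []
--
--     split_res = string.split(token)
--
--     for s in split_res:
--         result.append(s)
--         result.append(token)
--
--     result.pop()
--     return result
-- ===== SOURCE B (Python) =====
-- def solve(string, token):
--     if not token:
--         raise ValueError("empty separator")
--     result = []
--     rest = string
--     while True:
--         idx = rest.find(token)
--         if idx == -1:
--             result.append(rest)
--             return result
--         result.append(rest[:idx])
--         result.append(token)
--         rest = rest[idx + len(token):]
-- ===== Notes on version B (the rewrite author's own statement) =====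
-- stated objective: alternative
-- what changed: B builds the interleaved list directly in one find-scan over a shrinking suffix (emit piece, emit token, cut past the match) instead of A's split-into-pieces, append piece+token for each, then pop the trailing token.
import Mathlib
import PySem

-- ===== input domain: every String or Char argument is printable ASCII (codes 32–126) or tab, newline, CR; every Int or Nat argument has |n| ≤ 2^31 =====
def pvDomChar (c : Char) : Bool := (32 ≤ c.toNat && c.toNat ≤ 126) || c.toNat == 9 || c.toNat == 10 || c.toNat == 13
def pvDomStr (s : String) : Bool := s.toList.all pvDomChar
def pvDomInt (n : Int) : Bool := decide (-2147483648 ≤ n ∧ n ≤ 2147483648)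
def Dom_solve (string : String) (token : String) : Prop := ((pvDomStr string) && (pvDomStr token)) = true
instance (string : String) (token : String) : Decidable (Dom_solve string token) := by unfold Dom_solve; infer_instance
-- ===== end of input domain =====

-- B replaces A's split-then-interleave-then-pop by a single find-scan over a shrinking suffix (alternative decomposition).


-- ===== PORT A =====
def solve (string : String) (token : String) : List String :=
  match PySem.Str.split? string token with
  | none => []  -- token = "": Python's str.split raises ValueError (excluded by Pre_solve)
  | some split_res =>
      let result := split_res.foldl (fun acc s => acc ++ [s, token]) []
      result.dropLast  -- result.pop(): result is never empty here, pop removes the last element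

-- ===== PORT B =====
-- termination fact cited by the decreasing_by of solveAltGo (and of the proof-side helper `pieces` below)
theorem pv_drop_lt (tok rest : List Char) (htok : tok ≠ [])
    (h : PySem.Chars.find rest tok ≠ -1) :
    (rest.drop ((PySem.Chars.find rest tok).toNat + tok.length)).length < rest.length := by
  have hne : rest ≠ [] := by
    intro he
    apply h
    rw [he, PySem.Chars.find_eq_neg_one_iff]
    simp [List.infix_nil, htok]
  have htl : 0 < tok.length := List.length_pos_iff.mpr htok
  have hl : 0 < rest.length := List.length_pos_iff.mpr hne
  simp only [List.length_drop]
  omega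

-- the while-loop of B: find the token in `rest`; on a hit emit the piece and the token and cut past the match
def solveAltGo (tok : List Char) (htok : tok ≠ []) (rest : List Char)
    (acc : List (List Char)) : List (List Char) :=
  let idx := PySem.Chars.find rest tok
  if h : idx = -1 then acc ++ [rest]
  else solveAltGo tok htok (rest.drop (idx.toNat + tok.length)) (acc ++ [rest.take idx.toNat, tok])
termination_by rest.length
decreasing_by exact pv_drop_lt tok rest htok h

def solve_alt (string : String) (token : String) : List String :=
  if h : token.toList = [] then []  -- B raises ValueError here (excluded by Pre_solve)
  else (solveAltGo token.toList h string.toList []).map String.ofList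

-- ===== PRECONDITION & SPEC =====
-- Pre_ excludes exactly token = "", on which A (str.split) raises ValueError (B raises it too).
def Pre_solve (string : String) (token : String) : Prop := token ≠ ""
instance (string : String) (token : String) : Decidable (Pre_solve string token) := by
  unfold Pre_solve; infer_instance
def pvWitness_solve : String × String := ("abcab", "b")

def Spec_solve (string : String) (token : String) (out : List String) : Prop := out = solve_alt string token
instance (string : String) (token : String) (out : List String) : Decidable (Spec_solve string token out) := by unfold Spec_solve; infer_instance

-- ===== CLAIM (what is proved, stated in full; the proofs are below) =====
def Claim_equal_solve : Prop := ∀ (string : String) (token : String), Dom_solve string token → Pre_solve string token → Spec_solve string token (solve string token)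

-- ===== LEMMAS AND PROOFS =====

-- reference recursion both programs are reduced to: the split pieces, by first occurrence of the token
def pieces (tok : List Char) (htok : tok ≠ []) (s : List Char) : List (List Char) :=
  let r := PySem.Chars.find s tok
  if h : r = -1 then [s]
  else s.take r.toNat :: pieces tok htok (s.drop (r.toNat + tok.length))
termination_by s.length
decreasing_by exact pv_drop_lt tok s htok h

theorem pieces_neg (tok : List Char) (htok : tok ≠ []) (s : List Char)
    (h : PySem.Chars.find s tok = -1) : pieces tok htok s = [s] := by
  rw [pieces]; simp [h]

theorem pieces_pos (tok : List Char) (htok : tok ≠ []) (s : List Char)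
    (h : PySem.Chars.find s tok ≠ -1) :
    pieces tok htok s = s.take (PySem.Chars.find s tok).toNat ::
      pieces tok htok (s.drop ((PySem.Chars.find s tok).toNat + tok.length)) := by
  rw [pieces]; simp [h]

theorem pieces_ne_nil (tok : List Char) (htok : tok ≠ []) (s : List Char) :
    pieces tok htok s ≠ [] := by
  rw [pieces]; split <;> simp

theorem pv_find_nil (tok : List Char) (htok : tok ≠ []) :
    PySem.Chars.find [] tok = -1 := by
  rw [PySem.Chars.find_eq_neg_one_iff]
  simp [List.infix_nil, htok]

-- find returns n as soon as tok is a prefix at n and at no earlier position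
theorem pv_find_eq_coe (s tok : List Char) (n : Nat)
    (hp : tok <+: s.drop n) (hm : ∀ i < n, ¬ tok <+: s.drop i) :
    PySem.Chars.find s tok = (n : Int) := by
  have hinf : tok <:+: s := by
    obtain ⟨r, hr⟩ := hp
    exact ⟨s.take n, r, by rw [List.append_assoc, hr, List.take_append_drop]⟩
  have h0 : 0 ≤ PySem.Chars.find s tok := (PySem.Chars.find_nonneg_iff s tok).mpr hinf
  obtain ⟨hpre, hmin⟩ := PySem.Chars.find_spec h0
  rcases lt_trichotomy (PySem.Chars.find s tok).toNat n with h | h | h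
  · exact absurd hpre (hm _ h)
  · omega
  · exact absurd hp (hmin n h)

theorem pv_find_cons_prefix (c : Char) (rest tok : List Char) (h : tok <+: c :: rest) :
    PySem.Chars.find (c :: rest) tok = 0 := by
  have := pv_find_eq_coe (c :: rest) tok 0 (by simpa using h) (by omega)
  simpa using this

theorem pv_find_cons_not_prefix_neg (c : Char) (rest tok : List Char)
    (h : ¬ tok <+: c :: rest) (h2 : PySem.Chars.find rest tok = -1) :
    PySem.Chars.find (c :: rest) tok = -1 := by
  rw [PySem.Chars.find_eq_neg_one_iff] at h2 ⊢
  rw [List.infix_cons_iff]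
  tauto

theorem pv_find_cons_not_prefix_pos (c : Char) (rest tok : List Char)
    (h : ¬ tok <+: c :: rest) (h2 : PySem.Chars.find rest tok ≠ -1) :
    PySem.Chars.find (c :: rest) tok = PySem.Chars.find rest tok + 1 := by
  have h0 : 0 ≤ PySem.Chars.find rest tok := by
    have := PySem.Chars.neg_one_le_find rest tok
    omega
  obtain ⟨hpre, hmin⟩ := PySem.Chars.find_spec h0
  have key := pv_find_eq_coe (c :: rest) tok ((PySem.Chars.find rest tok).toNat + 1)
    (by simpa using hpre)
    (by
      intro i hi
      match i, hi with
      | 0, _ => simpa using h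
      | (j+1), hj => simpa using hmin j (by omega))
  rw [key]
  omega

-- the head of the current piece list still owes the reversed current-chunk prefix
def mapHead (f : List Char → List Char) : List (List Char) → List (List Char)
  | [] => []
  | p :: r => f p :: r

theorem pv_go_nil (tok cur : List Char) (acc : List (List Char)) (f : Nat) :
    PySem.Chars.splitOn.go tok (f+1) [] cur acc = (cur.reverse :: acc).reverse := by
  rw [PySem.Chars.splitOn.go.eq_def]

theorem pv_go_cons (tok cur : List Char) (acc : List (List Char)) (f : Nat)
    (c : Char) (rest : List Char) :
    PySem.Chars.splitOn.go tok (f+1) (c :: rest) cur acc =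
      if tok.isPrefixOf (c :: rest) then
        PySem.Chars.splitOn.go tok f (List.drop tok.length (c :: rest)) [] (cur.reverse :: acc)
      else PySem.Chars.splitOn.go tok f rest (c :: cur) acc := by
  rw [PySem.Chars.splitOn.go.eq_def]

-- characterisation of splitOn's fuelled scanner in terms of `pieces`
theorem pv_go_spec (tok : List Char) (htok : tok ≠ []) :
    ∀ fuel l cur acc, l.length < fuel →
      PySem.Chars.splitOn.go tok fuel l cur acc =
        acc.reverse ++ mapHead (fun p => cur.reverse ++ p) (pieces tok htok l) := by
  intro fuel
  induction fuel with
  | zero => intro l cur acc h; omega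
  | succ f ih =>
    intro l cur acc h
    have htl : 0 < tok.length := List.length_pos_iff.mpr htok
    cases l with
    | nil =>
      rw [pv_go_nil]
      rw [pieces_neg tok htok [] (pv_find_nil tok htok)]
      simp [mapHead]
    | cons c rest =>
      rw [pv_go_cons]
      simp only [List.length_cons] at h
      by_cases hb : tok.isPrefixOf (c :: rest)
      · have hpre : tok <+: c :: rest := List.isPrefixOf_iff_prefix.mp hb
        have hfind := pv_find_cons_prefix c rest tok hpre
        rw [if_pos hb]
        have hd : (List.drop tok.length (c :: rest)).length < f := by
          simp only [List.length_drop, List.length_cons]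
          omega
        rw [ih _ _ _ hd]
        rw [pieces_pos tok htok (c :: rest) (by rw [hfind]; omega)]
        rw [hfind]
        simp only [Int.toNat_zero, List.take_zero, Nat.zero_add, List.reverse_cons,
          List.append_assoc, List.singleton_append, List.reverse_nil]
        cases pieces tok htok (List.drop tok.length (c :: rest)) <;> simp [mapHead]
      · have hpre : ¬ tok <+: c :: rest := fun hc => hb (List.isPrefixOf_iff_prefix.mpr hc)
        rw [if_neg hb]
        rw [ih rest _ _ (by omega)]
        by_cases hr : PySem.Chars.find rest tok = -1
        · have h1 := pv_find_cons_not_prefix_neg c rest tok hpre hr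
          rw [pieces_neg tok htok _ h1, pieces_neg tok htok _ hr]
          simp [mapHead]
        · have h0 : 0 ≤ PySem.Chars.find rest tok := by
            have := PySem.Chars.neg_one_le_find rest tok
            omega
          have h1 := pv_find_cons_not_prefix_pos c rest tok hpre hr
          have h1ne : PySem.Chars.find (c :: rest) tok ≠ -1 := by omega
          rw [pieces_pos tok htok _ h1ne, pieces_pos tok htok _ hr]
          rw [h1]
          have ht1 : (PySem.Chars.find rest tok + 1).toNat
              = (PySem.Chars.find rest tok).toNat + 1 := by omega
          rw [ht1]
          simp [mapHead, List.take_succ_cons]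
          congr 1
          rw [show (PySem.Chars.find rest tok).toNat + 1 + tok.length
              = ((PySem.Chars.find rest tok).toNat + tok.length) + 1 by omega,
            List.drop_succ_cons]

theorem pv_splitOn_eq_pieces (s tok : List Char) (htok : tok ≠ []) :
    PySem.Chars.splitOn s tok = pieces tok htok s := by
  unfold PySem.Chars.splitOn
  rw [pv_go_spec tok htok (s.length + 1) s [] [] (by omega)]
  simp only [List.reverse_nil, List.nil_append]
  cases pieces tok htok s <;> simp [mapHead]

theorem pv_flatMap_pieces_ne_nil (tok : List Char) (htok : tok ≠ []) (s : List Char) :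
    (pieces tok htok s).flatMap (fun p => [p, tok]) ≠ [] := by
  have hne := pieces_ne_nil tok htok s
  cases h : pieces tok htok s with
  | nil => exact absurd h hne
  | cons p r => simp

-- B's loop computes the interleaved pieces with the trailing token dropped
theorem pv_altGo_spec (tok : List Char) (htok : tok ≠ []) :
    ∀ s acc, solveAltGo tok htok s acc =
      acc ++ ((pieces tok htok s).flatMap (fun p => [p, tok])).dropLast := by
  intro s acc
  induction s, acc using solveAltGo.induct tok htok with
  | case1 rest acc idx h =>
    rw [solveAltGo]
    rw [dif_pos h]
    rw [pieces_neg tok htok rest h]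
    simp
  | case2 rest acc idx h ih =>
    rw [solveAltGo]
    rw [dif_neg h]
    rw [pieces_pos tok htok rest h]
    rw [ih]
    have hne := pv_flatMap_pieces_ne_nil tok htok
      (rest.drop ((PySem.Chars.find rest tok).toNat + tok.length))
    rw [List.flatMap_cons, List.cons_append, List.cons_append, List.nil_append]
    rw [List.dropLast_cons_of_ne_nil (by simp),
      List.dropLast_cons_of_ne_nil hne]
    simp
    exact ⟨rfl, rfl⟩

-- ===== VERDICT (by name: the statement is the Claim_ definition above) =====
theorem solve_spec : Claim_equal_solve := by
  intro string token hdom hpre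
  unfold Spec_solve
  have htok : token.toList ≠ [] := by
    intro h
    apply hpre
    have := congrArg String.ofList h
    simpa using this
  unfold solve solve_alt
  rw [dif_neg htok]
  unfold PySem.Str.split?
  unfold PySem.Chars.split?
  rw [if_neg (by simpa using htok)]
  simp only [Option.map_some]
  rw [PySem.List.foldl_append_eq_flatMap]
  rw [pv_splitOn_eq_pieces string.toList token.toList htok]
  rw [pv_altGo_spec token.toList htok string.toList []]
  simp only [List.nil_append, List.flatMap_map, List.map_dropLast, List.map_flatMap]
  simp [String.ofList_toList]
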